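-- pv_equiv track=rewrite | github.com/kimgostring/ProblemSolving | 프로그래머스/5/49190. 방의 개수/방의 개수.py | solution
-- ===== SOURCE A (Python) =====
-- def solution(arrows):
--     DIRS = [(0, 1), (1, 1), (1, 0), (1, -1), (0, -1), (-1, -1), (-1, 0), (-1, 1)];
--
--     answer = 0;
--     x, y = 0, 0;
--     board = dict();
--     for d in arrows:
--         # x <-> x <-> x 와 같은 식으로 2배수해서 edge를 이을 것
--         # 이때, 첫/끝 지점에는 edge 하나
--         # 중간 지점에는 edge 두 개가 이어지게 됨
--         # 이미 있는 edge가 아닌 edge가 해당 점에 생기는 case = 방 하나 생김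
--         revD = (d + 4) % 8;
--         dx, dy = DIRS[d];
--
--         if (x, y) in board and d in board[(x, y)]:
--             # 이미 방문한 길인 경우, 고려 X
--             x += dx * 2;
--             y += dy * 2;
--             continue;
--
--         for i in range(2):
--             # i번째 - i+1번째 점 연결
--             tempX = x + (dx * (i + 1));
--             tempY = y + dy * (i + 1);
--             addLineToBoard(tempX - dx, tempY - dy, d, board);
--             addLineToBoard(tempX, tempY, revD, board);
--
--         notRoomDirs = [[d, revD], [revD]];
--         for i in range(2):
--             # i번째 점에서 다른 방향으로 그었던 선이 있는지 check
--             tempX = x + dx * (i + 1);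
--             tempY = y + dy * (i + 1);
--             for j in board[(tempX, tempY)]:
--                 if j not in notRoomDirs[i]:
--                     answer += 1;
--                     break;
--
--         x += dx * 2;
--         y += dy * 2;
--
--     return answer;
--
-- def addLineToBoard(x, y, d, board):
--     if (x, y) not in board:
--         board[(x, y)] = [d];
--     else:
--         board[(x, y)].append(d);
-- ===== SOURCE B (Python) =====
-- def solution(arrows):
--     DIRS = [(0, 1), (1, 1), (1, 0), (1, -1), (0, -1), (-1, -1), (-1, 0), (-1, 1)]
--     answer = 0
--     pos = (0, 0)
--     visited = {pos}
--     edges = set()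
--     for d in arrows:
--         dx, dy = DIRS[d]
--         for _ in range(2):
--             nxt = (pos[0] + dx, pos[1] + dy)
--             if nxt in visited and (pos, nxt) not in edges:
--                 answer += 1
--             edges.add((pos, nxt))
--             edges.add((nxt, pos))
--             visited.add(nxt)
--             pos = nxt
--     return answer
-- ===== Notes on version B (the rewrite author's own statement) =====
-- stated objective: simpler
-- what changed: replaces the point-to-direction-list dict and its two-phase add-then-scan (plus the inner loop over stored directions) by per-half-step bookkeeping with a visited-vertex set and a visited-edge set
-- outside the precondition, e.g. on solution([0, 1, -4, -3, 0, 1, 4, 5]): A returns 5, B returns 1; on solution([-1]): A returns 0, B returns 0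
import Mathlib
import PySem

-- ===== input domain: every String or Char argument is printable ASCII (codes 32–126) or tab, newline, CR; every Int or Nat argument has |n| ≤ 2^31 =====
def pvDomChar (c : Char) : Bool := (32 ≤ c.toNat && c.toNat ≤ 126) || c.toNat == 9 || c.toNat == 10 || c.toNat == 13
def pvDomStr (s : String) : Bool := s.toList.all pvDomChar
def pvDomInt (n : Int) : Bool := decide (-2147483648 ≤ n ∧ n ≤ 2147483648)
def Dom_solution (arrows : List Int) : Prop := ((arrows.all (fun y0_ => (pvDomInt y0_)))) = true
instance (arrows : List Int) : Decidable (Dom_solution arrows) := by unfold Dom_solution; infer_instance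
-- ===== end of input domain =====

-- B replaces A's point→direction-list dict and its add-then-scan passes by per-half-step
-- bookkeeping with a visited-vertex set and a visited-edge set (objective: simpler).

-- ===== PORT A =====
def pvDIRS : List (Int × Int) :=
  [(0, 1), (1, 1), (1, 0), (1, -1), (0, -1), (-1, -1), (-1, 0), (-1, 1)]

-- DIRS[d]; the none case (IndexError, |d| > 8) is excluded by Pre_solution
def pvDir (d : Int) : Int × Int := (PySem.List.pyGet? pvDIRS d).getD (0, 0)

def addLineToBoard (x y d : Int) (board : PySem.Dict (Int × Int) (List Int)) :
    PySem.Dict (Int × Int) (List Int) :=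
  if board.contains (x, y) = false then
    board.insert (x, y) [d]
  else
    board.modify (x, y) [] (fun l => l ++ [d])  -- board[(x,y)].append(d); key present, default unused

def stepA (st : Int × Int × Int × PySem.Dict (Int × Int) (List Int)) (d : Int) :
    Int × Int × Int × PySem.Dict (Int × Int) (List Int) :=
  let (answer, x, y, board) := st
  let revD := PySem.Int.mod (d + 4) 8
  let (dx, dy) := pvDir d
  if board.contains (x, y) && (board.getD (x, y) []).contains d then
    -- '(x, y) in board and d in board[(x, y)]': under the contains guard board[(x,y)] is getD
    (answer, x + dx * 2, y + dy * 2, board)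
  else
    let board := (PySem.List.pyRange 0 2 1).foldl (fun b i =>
      let tempX := x + dx * (i + 1)
      let tempY := y + dy * (i + 1)
      addLineToBoard tempX tempY revD (addLineToBoard (tempX - dx) (tempY - dy) d b)) board
    let notRoomDirs := [[d, revD], [revD]]
    let answer := (PySem.List.pyRange 0 2 1).foldl (fun a i =>
      let tempX := x + dx * (i + 1)
      let tempY := y + dy * (i + 1)
      -- 'for j in board[(tempX, tempY)]: if j not in notRoomDirs[i]: answer += 1; break'
      -- board[(tempX,tempY)] is a present key here (just added); notRoomDirs[i] with i ∈ {0, 1}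
      if (board.getD (tempX, tempY) []).any
          (fun j => !(((PySem.List.pyGet? notRoomDirs i).getD []).contains j)) then a + 1 else a)
      answer
    (answer, x + dx * 2, y + dy * 2, board)

def solution (arrows : List Int) : Int :=
  (arrows.foldl stepA (0, 0, 0, PySem.Dict.empty)).1

-- ===== PORT B =====
def stepB (st : Int × (Int × Int) × PySem.Set (Int × Int) × PySem.Set ((Int × Int) × (Int × Int)))
    (d : Int) : Int × (Int × Int) × PySem.Set (Int × Int) × PySem.Set ((Int × Int) × (Int × Int)) :=
  let (answer, pos, visited, edges) := st
  let (dx, dy) := pvDir d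
  (PySem.List.pyRange 0 2 1).foldl (fun st _ =>
    let (answer, pos, visited, edges) := st
    let nxt := (pos.1 + dx, pos.2 + dy)
    let answer := if visited.contains nxt && !(edges.contains (pos, nxt)) then answer + 1 else answer
    let edges := PySem.Set.add (PySem.Set.add edges (pos, nxt)) (nxt, pos)
    let visited := PySem.Set.add visited nxt
    (answer, nxt, visited, edges)) (answer, pos, visited, edges)

def solution_alt (arrows : List Int) : Int :=
  (arrows.foldl stepB (0, (0, 0), PySem.Set.ofList [(0, 0)], PySem.Set.empty)).1

-- ===== PRECONDITION & SPEC =====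
-- Pre_ restricts to the problem's direction domain 0..7.  Negative codes -8..-1, on which A
-- still returns via Python's negative list indexing, are excluded because A keys its edge
-- bookkeeping on the raw direction value, so an arrow and its negative alias (e.g. 4 and -4)
-- name the same edge with different labels and A can miscount; any other int raises IndexError.
def Pre_solution (arrows : List Int) : Prop := ∀ a ∈ arrows, 0 ≤ a ∧ a < 8
instance (arrows : List Int) : Decidable (Pre_solution arrows) := by unfold Pre_solution; infer_instance

def pvWitness_solution : List Int := [6, 6, 6, 4, 4, 4, 2, 2, 2, 0, 0, 0, 1, 6, 5, 5, 3, 6, 0]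

def Spec_solution (arrows : List Int) (out : Int) : Prop := out = solution_alt arrows
instance (arrows : List Int) (out : Int) : Decidable (Spec_solution arrows out) := by unfold Spec_solution; infer_instance

-- ===== CLAIM (what is proved, stated in full; the proofs are below) =====
def Claim_equal_solution : Prop := ∀ (arrows : List Int), Dom_solution arrows → Pre_solution arrows → Spec_solution arrows (solution arrows)

-- ===== LEMMAS AND PROOFS =====

-- board lookup as a total list; points; unit steps
def pvBd (b : PySem.Dict (Int × Int) (List Int)) (r : Int × Int) : List Int := b.getD r []
def pAdd (p q : Int × Int) : Int × Int := (p.1 + q.1, p.2 + q.2)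
def pvRv (j : Int) : Int := PySem.Int.mod (j + 4) 8

lemma int8_cases {j : Int} (h0 : 0 ≤ j) (h8 : j < 8) :
    j = 0 ∨ j = 1 ∨ j = 2 ∨ j = 3 ∨ j = 4 ∨ j = 5 ∨ j = 6 ∨ j = 7 := by omega

lemma rv_range {j : Int} (h0 : 0 ≤ j) (h8 : j < 8) : 0 ≤ pvRv j ∧ pvRv j < 8 := by
  obtain h|h|h|h|h|h|h|h := int8_cases h0 h8 <;> subst h <;> decide

lemma rv_rv {j : Int} (h0 : 0 ≤ j) (h8 : j < 8) : pvRv (pvRv j) = j := by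
  obtain h|h|h|h|h|h|h|h := int8_cases h0 h8 <;> subst h <;> decide

lemma dir_rv {j : Int} (h0 : 0 ≤ j) (h8 : j < 8) :
    pvDir (pvRv j) = (-(pvDir j).1, -(pvDir j).2) := by
  obtain h|h|h|h|h|h|h|h := int8_cases h0 h8 <;> subst h <;> decide

lemma dir_odd {j : Int} (h0 : 0 ≤ j) (h8 : j < 8) :
    ¬((pvDir j).1 % 2 = 0 ∧ (pvDir j).2 % 2 = 0) := by
  obtain h|h|h|h|h|h|h|h := int8_cases h0 h8 <;> subst h <;> decide

lemma dir_inj {j k : Int} (hj0 : 0 ≤ j) (hj8 : j < 8) (hk0 : 0 ≤ k) (hk8 : k < 8)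
    (h : pvDir j = pvDir k) : j = k := by
  obtain hj|hj|hj|hj|hj|hj|hj|hj := int8_cases hj0 hj8 <;> subst hj <;>
    (obtain hk|hk|hk|hk|hk|hk|hk|hk := int8_cases hk0 hk8 <;> subst hk <;>
      first | rfl | exact absurd h (by decide))

-- the invariant tying A's (answer, x, y, board) to B's (answer, pos, visited, edges)
def pvInv (a x y : Int) (b : PySem.Dict (Int × Int) (List Int))
    (a' : Int) (pos : Int × Int) (V : PySem.Set (Int × Int))
    (E : PySem.Set ((Int × Int) × (Int × Int))) : Prop :=
  a = a' ∧ pos = (x, y) ∧ x % 2 = 0 ∧ y % 2 = 0 ∧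
  ((x, y) = ((0 : Int), (0 : Int)) ∨ pvBd b (0, 0) ≠ []) ∧
  ((x, y) = ((0 : Int), (0 : Int)) ∨ pvBd b (x, y) ≠ []) ∧
  (∀ r, r ∈ V ↔ (r = ((0 : Int), (0 : Int)) ∨ pvBd b r ≠ [])) ∧
  (∀ e : (Int × Int) × (Int × Int), e ∈ E ↔ ∃ j, j ∈ pvBd b e.1 ∧ e.2 = pAdd e.1 (pvDir j)) ∧
  (∀ r j, j ∈ pvBd b r → 0 ≤ j ∧ j < 8) ∧
  (∀ r j, r.1 % 2 = 0 → r.2 % 2 = 0 → j ∈ pvBd b r →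
    j ∈ pvBd b (pAdd r (pvDir j)) ∧ pvRv j ∈ pvBd b (pAdd r (pvDir j)) ∧
    pvRv j ∈ pvBd b (pAdd (pAdd r (pvDir j)) (pvDir j))) ∧
  (∀ r j, ¬(r.1 % 2 = 0 ∧ r.2 % 2 = 0) → j ∈ pvBd b r →
    pvRv j ∈ pvBd b r ∧ j ∈ pvBd b (pAdd r (-(pvDir j).1, -(pvDir j).2)))

lemma pr2 : PySem.List.pyRange 0 2 1 = [0, 1] := by decide

lemma bd_add (ax ay dd : Int) (b : PySem.Dict (Int × Int) (List Int)) (r : Int × Int) :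
    pvBd (addLineToBoard ax ay dd b) r =
      if r = (ax, ay) then pvBd b r ++ [dd] else pvBd b r := by
  unfold addLineToBoard pvBd
  by_cases hc : b.contains (ax, ay) = false
  · rw [if_pos hc, PySem.Dict.getD_insert]
    split_ifs with h
    · subst h; rw [PySem.Dict.getD_of_not_contains b [] hc]; rfl
    · rfl
  · rw [if_neg hc, PySem.Dict.getD_modify]
    split_ifs with h
    · subst h; rfl
    · rfl

lemma guard_iff (b : PySem.Dict (Int × Int) (List Int)) (p : Int × Int) (d : Int) :
    (b.contains p && (b.getD p []).contains d) = true ↔ d ∈ pvBd b p := by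
  cases hcon : b.contains p
  · simp [pvBd, PySem.Dict.getD_of_not_contains b [] hcon]
  · simp [pvBd]

lemma pvInv_init : pvInv 0 0 0 PySem.Dict.empty 0 (0, 0) (PySem.Set.ofList [(0, 0)]) PySem.Set.empty := by
  refine ⟨rfl, rfl, rfl, rfl, Or.inl rfl, Or.inl rfl, ?_, ?_, ?_, ?_, ?_⟩ <;>
    simp [pvBd, PySem.Dict.getD_empty, PySem.Set.mem_ofList, PySem.Set.empty]

lemma mem_bd4 (px py mx my qx qy d rv : Int) (b : PySem.Dict (Int × Int) (List Int))
    (r : Int × Int) (j' : Int) :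
    j' ∈ pvBd (addLineToBoard qx qy rv (addLineToBoard mx my d
        (addLineToBoard mx my rv (addLineToBoard px py d b)))) r ↔
      j' ∈ pvBd b r ∨ (r = (px, py) ∧ j' = d) ∨ (r = (mx, my) ∧ (j' = rv ∨ j' = d)) ∨
      (r = (qx, qy) ∧ j' = rv) := by
  simp only [bd_add]
  split_ifs <;> simp_all <;> tauto

lemma step_inv (d a x y : Int) (b : PySem.Dict (Int × Int) (List Int))
    (a' : Int) (pos : Int × Int) (V : PySem.Set (Int × Int))
    (E : PySem.Set ((Int × Int) × (Int × Int)))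
    (hd0 : 0 ≤ d) (hd8 : d < 8) (h : pvInv a x y b a' pos V E) :
    pvInv (stepA (a, x, y, b) d).1 (stepA (a, x, y, b) d).2.1 (stepA (a, x, y, b) d).2.2.1
      (stepA (a, x, y, b) d).2.2.2
      (stepB (a', pos, V, E) d).1 (stepB (a', pos, V, E) d).2.1
      (stepB (a', pos, V, E) d).2.2.1 (stepB (a', pos, V, E) d).2.2.2 := by
  obtain ⟨h1, h2, h3, h4, h5, h6, h7, h8, h9, h10, h11⟩ := h
  subst h1 h2
  rcases hud : pvDir d with ⟨dx, dy⟩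
  have hodd : ¬(dx % 2 = 0 ∧ dy % 2 = 0) := by
    have := dir_odd hd0 hd8; rw [hud] at this; simpa using this
  have hrv0 := (rv_range hd0 hd8).1
  have hrv8 := (rv_range hd0 hd8).2
  have hrvrv := rv_rv hd0 hd8
  have hdirrv : pvDir (pvRv d) = (-dx, -dy) := by rw [dir_rv hd0 hd8, hud]
  by_cases hg : d ∈ pvBd b (x, y)
  · -- SKIP: the move was already walked; A leaves answer and board alone
    have hgb : (b.contains (x, y) && (b.getD (x, y) []).contains d) = true :=
      (guard_iff b (x, y) d).mpr hg
    have hmove := h10 (x, y) d h3 h4 hg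
    rw [hud] at hmove
    simp only [pAdd] at hmove
    obtain ⟨hdm, hrm, hrq⟩ := hmove
    simp only [stepA, stepB, hud, pr2, List.foldl, hgb, if_true]
    have hpm : (((x, y), (x + dx, y + dy)) : (Int × Int) × (Int × Int)) ∈ E :=
      (h8 _).mpr ⟨d, hg, by simp only [pAdd, hud]⟩
    have hmq : (((x + dx, y + dy), (x + dx + dx, y + dy + dy)) : (Int × Int) × (Int × Int)) ∈ E :=
      (h8 _).mpr ⟨d, hdm, by simp only [pAdd, hud]⟩
    have hmp : (((x + dx, y + dy), (x, y)) : (Int × Int) × (Int × Int)) ∈ E :=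
      (h8 _).mpr ⟨pvRv d, hrm, by simp only [pAdd, hdirrv, Prod.mk.injEq]; constructor <;> ring⟩
    have hqm : (((x + dx + dx, y + dy + dy), (x + dx, y + dy)) : (Int × Int) × (Int × Int)) ∈ E :=
      (h8 _).mpr ⟨pvRv d, hrq, by simp only [pAdd, hdirrv, Prod.mk.injEq]; constructor <;> ring⟩
    have hc1 : E.contains ((x, y), (x + dx, y + dy)) = true := (PySem.Set.contains_iff _ _).mpr hpm
    have hc2 : ((E.add ((x, y), (x + dx, y + dy))).add ((x + dx, y + dy), (x, y))).contains
        ((x + dx, y + dy), (x + dx + dx, y + dy + dy)) = true :=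
      (PySem.Set.contains_iff _ _).mpr ((PySem.Set.mem_add _ _ _).mpr (Or.inl
        ((PySem.Set.mem_add _ _ _).mpr (Or.inl hmq))))
    simp only [hc1, hc2, Bool.not_true, Bool.and_false, Bool.false_eq_true, if_false]
    have hm_ne : pvBd b (x + dx, y + dy) ≠ [] := List.ne_nil_of_mem hdm
    have hq_ne : pvBd b (x + dx + dx, y + dy + dy) ≠ [] := List.ne_nil_of_mem hrq
    have hEeq : ∀ e, e ∈ ((((E.add ((x, y), (x + dx, y + dy))).add ((x + dx, y + dy), (x, y))).add
        ((x + dx, y + dy), (x + dx + dx, y + dy + dy))).add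
        ((x + dx + dx, y + dy + dy), (x + dx, y + dy))) ↔ e ∈ E := by
      intro e
      simp only [PySem.Set.mem_add]
      constructor
      · rintro ((((h | rfl) | rfl) | rfl) | rfl)
        · exact h
        · exact hpm
        · exact hmp
        · exact hmq
        · exact hqm
      · tauto
    refine ⟨rfl, ?_, by omega, by omega, ?_, ?_, ?_, ?_, h9, h10, h11⟩
    · rw [Prod.mk.injEq]; constructor <;> ring
    · rcases h5 with h5 | h5
      · rw [Prod.mk.injEq] at h5
        obtain ⟨hx, hy⟩ := h5; subst hx; subst hy
        right; exact List.ne_nil_of_mem hg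
      · exact Or.inr h5
    · right
      have hq2 : ((x + dx * 2, y + dy * 2) : Int × Int) = (x + dx + dx, y + dy + dy) := by
        rw [Prod.mk.injEq]; constructor <;> ring
      rw [hq2]; exact hq_ne
    · intro r
      simp only [PySem.Set.mem_add, h7]
      constructor
      · rintro (((h | h) | rfl) | rfl)
        · exact Or.inl h
        · exact Or.inr h
        · exact Or.inr hm_ne
        · exact Or.inr hq_ne
      · tauto
    · intro e
      rw [hEeq]
      exact h8 e
  · -- NOSKIP: a fresh doubled move; A records four half-edge labels then counts
    have hgb : ¬((b.contains (x, y) && (b.getD (x, y) []).contains d) = true) :=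
      fun hh => hg ((guard_iff b (x, y) d).mp hh)
    have hm4 : PySem.Int.mod (d + 4) 8 = pvRv d := rfl
    simp only [stepA, stepB, hud, pr2, List.foldl, if_neg hgb, hm4]
    simp only [show x + dx * (0 + 1) = x + dx from by ring, show y + dy * (0 + 1) = y + dy from by ring,
      show x + dx * (1 + 1) = x + dx + dx from by ring, show y + dy * (1 + 1) = y + dy + dy from by ring,
      show x + dx * 2 = x + dx + dx from by ring, show y + dy * 2 = y + dy + dy from by ring,
      show (PySem.List.pyGet? [[d, pvRv d], [pvRv d]] (0:Int)).getD [] = [d, pvRv d] from rfl,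
      show (PySem.List.pyGet? [[d, pvRv d], [pvRv d]] (1:Int)).getD [] = [pvRv d] from rfl]
    simp only [add_sub_cancel_right]
    set b' := addLineToBoard (x + dx + dx) (y + dy + dy) (pvRv d)
      (addLineToBoard (x + dx) (y + dy) d
        (addLineToBoard (x + dx) (y + dy) (pvRv d) (addLineToBoard x y d b))) with hb'
    have hmem : ∀ (r : Int × Int) (j' : Int), j' ∈ pvBd b' r ↔ j' ∈ pvBd b r ∨
        (r = (x, y) ∧ j' = d) ∨ (r = (x + dx, y + dy) ∧ (j' = pvRv d ∨ j' = d)) ∨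
        (r = (x + dx + dx, y + dy + dy) ∧ j' = pvRv d) := by
      intro r j'
      rw [hb']
      exact mem_bd4 x y (x + dx) (y + dy) (x + dx + dx) (y + dy + dy) d (pvRv d) b r j' 
    -- the two just-drawn half-edges and their labels are genuinely new
    have hmodd : ¬((x + dx) % 2 = 0 ∧ (y + dy) % 2 = 0) := by omega
    have hm_ne0 : ((x + dx, y + dy) : Int × Int) ≠ (0, 0) := by
      intro hh; rw [Prod.mk.injEq] at hh; omega
    have hmp : ((x + dx, y + dy) : Int × Int) ≠ (x, y) := by
      intro hh; rw [Prod.mk.injEq] at hh; omega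
    have hqp : ((x + dx + dx, y + dy + dy) : Int × Int) ≠ (x, y) := by
      intro hh; rw [Prod.mk.injEq] at hh; omega
    have hqm : ((x + dx + dx, y + dy + dy) : Int × Int) ≠ (x + dx, y + dy) := by
      intro hh; rw [Prod.mk.injEq] at hh; omega
    have ndm : d ∉ pvBd b (x + dx, y + dy) := by
      intro hh
      have h2 := (h11 (x + dx, y + dy) d hmodd hh).2
      rw [hud] at h2; simp only [pAdd] at h2
      rw [show ((x + dx + -dx, y + dy + -dy) : Int × Int) = (x, y) from by
        rw [Prod.mk.injEq]; constructor <;> ring] at h2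
      exact hg h2
    have nrm : pvRv d ∉ pvBd b (x + dx, y + dy) := by
      intro hh
      have h1 := (h11 _ _ hmodd hh).1
      rw [hrvrv] at h1
      exact ndm h1
    have nrq : pvRv d ∉ pvBd b (x + dx + dx, y + dy + dy) := by
      intro hh
      have h1 := (h10 (x + dx + dx, y + dy + dy) (pvRv d) (by omega) (by omega) hh).1
      rw [hdirrv] at h1; simp only [pAdd] at h1
      rw [show ((x + dx + dx + -dx, y + dy + dy + -dy) : Int × Int) = (x + dx, y + dy) from by
        rw [Prod.mk.injEq]; constructor <;> ring] at h1
      exact nrm h1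
    have nEpm : (((x, y), (x + dx, y + dy)) : (Int × Int) × (Int × Int)) ∉ E := by
      intro hh
      obtain ⟨j, hj, hej⟩ := (h8 _).mp hh
      obtain ⟨hj0, hj8⟩ := h9 _ j hj
      simp only [pAdd, Prod.mk.injEq] at hej
      have hjd : pvDir j = pvDir d := by
        rw [hud, Prod.ext_iff]; constructor <;> simp <;> omega
      rw [dir_inj hj0 hj8 hd0 hd8 hjd] at hj
      exact hg hj
    have nEmq : (((x + dx, y + dy), (x + dx + dx, y + dy + dy)) : (Int × Int) × (Int × Int)) ∉ E := by
      intro hh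
      obtain ⟨j, hj, hej⟩ := (h8 _).mp hh
      obtain ⟨hj0, hj8⟩ := h9 _ j hj
      simp only [pAdd, Prod.mk.injEq] at hej
      have hjd : pvDir j = pvDir d := by
        rw [hud, Prod.ext_iff]; constructor <;> simp <;> omega
      rw [dir_inj hj0 hj8 hd0 hd8 hjd] at hj
      exact ndm hj
    -- Bool equalities: A's two any-scans coincide with B's two set tests
    have boolext : ∀ (b1 b2 : Bool), (b1 = true ↔ b2 = true) → b1 = b2 := by decide
    have q_marked : ((x + dx + dx, y + dy + dy) : Int × Int) = (0, 0) →
        pvBd b (x + dx + dx, y + dy + dy) ≠ [] := by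
      intro hq0
      rcases h5 with h5 | h5
      · exfalso; rw [Prod.mk.injEq] at h5 hq0; omega
      · rw [hq0]; exact h5
    have hb1 : (pvBd b' (x + dx, y + dy)).any (fun j => !([d, pvRv d].contains j)) =
        (V.contains (x + dx, y + dy) && !E.contains ((x, y), (x + dx, y + dy))) := by
      apply boolext
      rw [Bool.and_eq_true, List.any_eq_true]
      constructor
      · rintro ⟨j, hj, hpj⟩
        have hnd : j ≠ d := by intro e; subst e; simp at hpj
        have hnr : j ≠ pvRv d := by intro e; subst e; simp at hpj
        rcases (hmem _ _).mp hj with hh | ⟨_, rfl⟩ | ⟨_, hh⟩ | ⟨hr, rfl⟩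
        · constructor
          · rw [PySem.Set.contains_iff, h7]
            exact Or.inr (List.ne_nil_of_mem hh)
          · simp only [Bool.not_eq_eq_eq_not, Bool.not_true]
            rw [Bool.eq_false_iff]
            exact fun hc => nEpm ((PySem.Set.contains_iff _ _).mp hc)
        · exact absurd rfl hnd
        · rcases hh with rfl | rfl
          · exact absurd rfl hnr
          · exact absurd rfl hnd
        · exact absurd rfl hnr
      · rintro ⟨hv, -⟩
        rw [PySem.Set.contains_iff, h7] at hv
        rcases hv with hv | hv
        · exact absurd hv hm_ne0
        · obtain ⟨j, hj⟩ := List.exists_mem_of_ne_nil _ hv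
          refine ⟨j, (hmem _ _).mpr (Or.inl hj), ?_⟩
          have hnd : j ≠ d := fun e => ndm (e ▸ hj)
          have hnr : j ≠ pvRv d := fun e => nrm (e ▸ hj)
          simp [hnd, hnr]
    have hb2 : (pvBd b' (x + dx + dx, y + dy + dy)).any (fun j => !([pvRv d].contains j)) =
        ((V.add (x + dx, y + dy)).contains (x + dx + dx, y + dy + dy) &&
          !((E.add ((x, y), (x + dx, y + dy))).add ((x + dx, y + dy), (x, y))).contains
            ((x + dx, y + dy), (x + dx + dx, y + dy + dy))) := by
      apply boolext
      rw [Bool.and_eq_true, List.any_eq_true]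
      have hE2 : (((x + dx, y + dy), (x + dx + dx, y + dy + dy)) : (Int × Int) × (Int × Int)) ∉
          (E.add ((x, y), (x + dx, y + dy))).add ((x + dx, y + dy), (x, y)) := by
        rw [PySem.Set.mem_add, PySem.Set.mem_add]
        rintro ((hh | hh) | hh)
        · exact nEmq hh
        · rw [Prod.mk.injEq] at hh; exact hmp hh.1
        · rw [Prod.mk.injEq] at hh; exact hqp hh.2
      constructor
      · rintro ⟨j, hj, hpj⟩
        have hnr : j ≠ pvRv d := by intro e; subst e; simp at hpj
        rcases (hmem _ _).mp hj with hh | ⟨hr, rfl⟩ | ⟨hr, hh⟩ | ⟨_, rfl⟩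
        · constructor
          · rw [PySem.Set.contains_iff, PySem.Set.mem_add, h7]
            exact Or.inl (Or.inr (List.ne_nil_of_mem hh))
          · simp only [Bool.not_eq_eq_eq_not, Bool.not_true]
            rw [Bool.eq_false_iff]
            exact fun hc => hE2 ((PySem.Set.contains_iff _ _).mp hc)
        · exact absurd hr hqp
        · exact absurd hr hqm
        · exact absurd rfl hnr
      · rintro ⟨hv, -⟩
        rw [PySem.Set.contains_iff, PySem.Set.mem_add, h7] at hv
        have hvne : pvBd b (x + dx + dx, y + dy + dy) ≠ [] := by
          rcases hv with (hv | hv) | hv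
          · exact q_marked hv
          · exact hv
          · exact absurd hv hqm
        obtain ⟨j, hj⟩ := List.exists_mem_of_ne_nil _ hvne
        refine ⟨j, (hmem _ _).mpr (Or.inl hj), ?_⟩
        simp only [Bool.not_eq_eq_eq_not, Bool.not_true, List.contains_eq_mem,
          decide_eq_false_iff_not, List.mem_singleton]
        have hnr : j ≠ pvRv d := fun e => nrq (e ▸ hj)
        simp [hnr]
    simp only [show ∀ (bb : PySem.Dict (Int × Int) (List Int)) (r : Int × Int),
      bb.getD r [] = pvBd bb r from fun _ _ => rfl]
    rw [hb1, hb2]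
    refine ⟨rfl, rfl, by omega, by omega, ?_, ?_, ?_, ?_, ?_, ?_, ?_⟩
    · -- origin is marked on b'
      right
      rcases h5 with h5 | h5
      · rw [Prod.mk.injEq] at h5
        obtain ⟨hx, hy⟩ := h5; subst hx; subst hy
        exact List.ne_nil_of_mem ((hmem _ _).mpr (Or.inr (Or.inl ⟨rfl, rfl⟩)))
      · obtain ⟨j, hj⟩ := List.exists_mem_of_ne_nil _ h5
        exact List.ne_nil_of_mem ((hmem _ _).mpr (Or.inl hj))
    · -- the new position is marked on b'
      right
      exact List.ne_nil_of_mem ((hmem _ _).mpr (Or.inr (Or.inr (Or.inr ⟨rfl, rfl⟩))))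
    · -- visited-vertex characterisation
      intro r
      rw [PySem.Set.mem_add, PySem.Set.mem_add, h7]
      constructor
      · rintro (((hv | hne) | rfl) | rfl)
        · exact Or.inl hv
        · obtain ⟨j, hj⟩ := List.exists_mem_of_ne_nil _ hne
          exact Or.inr (List.ne_nil_of_mem ((hmem _ _).mpr (Or.inl hj)))
        · exact Or.inr (List.ne_nil_of_mem
            ((hmem _ _).mpr (Or.inr (Or.inr (Or.inl ⟨rfl, Or.inl rfl⟩)))))
        · exact Or.inr (List.ne_nil_of_mem
            ((hmem _ _).mpr (Or.inr (Or.inr (Or.inr ⟨rfl, rfl⟩)))))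
      · rintro (rfl | hne)
        · exact Or.inl (Or.inl (Or.inl rfl))
        · obtain ⟨j, hj⟩ := List.exists_mem_of_ne_nil _ hne
          rcases (hmem _ _).mp hj with hh | ⟨rfl, rfl⟩ | ⟨rfl, hh⟩ | ⟨rfl, rfl⟩
          · exact Or.inl (Or.inl (Or.inr (List.ne_nil_of_mem hh)))
          · rcases h6 with h6 | h6
            · exact Or.inl (Or.inl (Or.inl h6))
            · exact Or.inl (Or.inl (Or.inr h6))
          · exact Or.inl (Or.inr rfl)
          · exact Or.inr rfl
    · -- visited-edge characterisation
      intro e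
      obtain ⟨e1, e2⟩ := e
      rw [PySem.Set.mem_add, PySem.Set.mem_add, PySem.Set.mem_add, PySem.Set.mem_add]
      constructor
      · rintro ((((he | he) | he) | he) | he)
        · obtain ⟨j, hj, hej⟩ := (h8 _).mp he
          exact ⟨j, (hmem _ _).mpr (Or.inl hj), hej⟩
        · rw [Prod.mk.injEq] at he
          obtain ⟨rfl, rfl⟩ := he
          exact ⟨d, (hmem _ _).mpr (Or.inr (Or.inl ⟨rfl, rfl⟩)),
            by rw [hud]; simp only [pAdd]⟩
        · rw [Prod.mk.injEq] at he
          obtain ⟨rfl, rfl⟩ := he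
          exact ⟨pvRv d, (hmem _ _).mpr (Or.inr (Or.inr (Or.inl ⟨rfl, Or.inl rfl⟩))),
            by rw [hdirrv]; simp only [pAdd, Prod.mk.injEq]; omega⟩
        · rw [Prod.mk.injEq] at he
          obtain ⟨rfl, rfl⟩ := he
          exact ⟨d, (hmem _ _).mpr (Or.inr (Or.inr (Or.inl ⟨rfl, Or.inr rfl⟩))),
            by rw [hud]; simp only [pAdd]⟩
        · rw [Prod.mk.injEq] at he
          obtain ⟨rfl, rfl⟩ := he
          exact ⟨pvRv d, (hmem _ _).mpr (Or.inr (Or.inr (Or.inr ⟨rfl, rfl⟩))),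
            by rw [hdirrv]; simp only [pAdd, Prod.mk.injEq]; omega⟩
      · rintro ⟨j, hj, hej⟩
        dsimp only at hj hej
        rcases (hmem _ _).mp hj with hh | ⟨rfl, rfl⟩ | ⟨rfl, hh⟩ | ⟨rfl, rfl⟩
        · exact Or.inl (Or.inl (Or.inl (Or.inl ((h8 _).mpr ⟨j, hh, hej⟩))))
        · refine Or.inl (Or.inl (Or.inl (Or.inr ?_)))
          rw [hej, hud]; simp only [pAdd]
        · rcases hh with rfl | rfl
          · refine Or.inl (Or.inl (Or.inr ?_))
            rw [hej, hdirrv]; simp only [pAdd, Prod.mk.injEq]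
            exact ⟨trivial, by omega, by omega⟩
          · refine Or.inl (Or.inr ?_)
            rw [hej, hud]; simp only [pAdd]
        · refine Or.inr ?_
          rw [hej, hdirrv]; simp only [pAdd, Prod.mk.injEq]
          exact ⟨trivial, by omega, by omega⟩
    · -- all stored labels are directions 0..7
      intro r j hj
      rcases (hmem _ _).mp hj with hh | ⟨-, rfl⟩ | ⟨-, hh⟩ | ⟨-, rfl⟩
      · exact h9 _ _ hh
      · exact ⟨hd0, hd8⟩
      · rcases hh with rfl | rfl
        · exact ⟨hrv0, hrv8⟩
        · exact ⟨hd0, hd8⟩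
      · exact ⟨hrv0, hrv8⟩
    · -- full-move property at even points
      intro r j hr1 hr2 hj
      rcases (hmem _ _).mp hj with hh | ⟨rfl, rfl⟩ | ⟨rfl, hh⟩ | ⟨rfl, rfl⟩
      · obtain ⟨c1, c2, c3⟩ := h10 r j hr1 hr2 hh
        exact ⟨(hmem _ _).mpr (Or.inl c1), (hmem _ _).mpr (Or.inl c2),
          (hmem _ _).mpr (Or.inl c3)⟩
      · rw [hud]
        rw [show pAdd (x, y) (dx, dy) = ((x + dx, y + dy) : Int × Int) from by
          simp only [pAdd]]
        rw [show pAdd ((x + dx, y + dy) : Int × Int) (dx, dy) =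
            ((x + dx + dx, y + dy + dy) : Int × Int) from by simp only [pAdd]]
        exact ⟨(hmem _ _).mpr (Or.inr (Or.inr (Or.inl ⟨rfl, Or.inr rfl⟩))),
          (hmem _ _).mpr (Or.inr (Or.inr (Or.inl ⟨rfl, Or.inl rfl⟩))),
          (hmem _ _).mpr (Or.inr (Or.inr (Or.inr ⟨rfl, rfl⟩)))⟩
      · exact absurd ⟨hr1, hr2⟩ hmodd
      · rw [hrvrv, hdirrv]
        rw [show pAdd ((x + dx + dx, y + dy + dy) : Int × Int) (-dx, -dy) =
            ((x + dx, y + dy) : Int × Int) from by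
          simp only [pAdd, Prod.mk.injEq]; omega]
        rw [show pAdd ((x + dx, y + dy) : Int × Int) (-dx, -dy) = ((x, y) : Int × Int) from by
          simp only [pAdd, Prod.mk.injEq]; omega]
        exact ⟨(hmem _ _).mpr (Or.inr (Or.inr (Or.inl ⟨rfl, Or.inl rfl⟩))),
          (hmem _ _).mpr (Or.inr (Or.inr (Or.inl ⟨rfl, Or.inr rfl⟩))),
          (hmem _ _).mpr (Or.inr (Or.inl ⟨rfl, rfl⟩))⟩
    · -- midpoint property at odd points
      intro r j hro hj
      rcases (hmem _ _).mp hj with hh | ⟨rfl, rfl⟩ | ⟨rfl, hh⟩ | ⟨rfl, rfl⟩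
      · obtain ⟨c1, c2⟩ := h11 r j hro hh
        exact ⟨(hmem _ _).mpr (Or.inl c1), (hmem _ _).mpr (Or.inl c2)⟩
      · exact absurd ⟨h3, h4⟩ hro
      · rcases hh with rfl | rfl
        · refine ⟨?_, ?_⟩
          · rw [hrvrv]
            exact (hmem _ _).mpr (Or.inr (Or.inr (Or.inl ⟨rfl, Or.inr rfl⟩)))
          · rw [hdirrv]
            rw [show pAdd ((x + dx, y + dy) : Int × Int) (- -dx, - -dy) =
                ((x + dx + dx, y + dy + dy) : Int × Int) from by
              simp only [pAdd, Prod.mk.injEq]; omega]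
            exact (hmem _ _).mpr (Or.inr (Or.inr (Or.inr ⟨rfl, rfl⟩)))
        · refine ⟨?_, ?_⟩
          · exact (hmem _ _).mpr (Or.inr (Or.inr (Or.inl ⟨rfl, Or.inl rfl⟩)))
          · rw [hud]
            rw [show pAdd ((x + dx, y + dy) : Int × Int) (-dx, -dy) =
                ((x, y) : Int × Int) from by simp only [pAdd, Prod.mk.injEq]; omega]
            exact (hmem _ _).mpr (Or.inr (Or.inl ⟨rfl, rfl⟩))
      · exact absurd ⟨(by omega : (x + dx + dx) % 2 = 0),
          (by omega : (y + dy + dy) % 2 = 0)⟩ hro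

lemma fold_inv (arrows : List Int) (hpre : ∀ a ∈ arrows, 0 ≤ a ∧ a < 8) :
    ∀ (a x y : Int) (b : PySem.Dict (Int × Int) (List Int)) (a' : Int) (pos : Int × Int)
      (V : PySem.Set (Int × Int)) (E : PySem.Set ((Int × Int) × (Int × Int))),
      pvInv a x y b a' pos V E →
      (arrows.foldl stepA (a, x, y, b)).1 = (arrows.foldl stepB (a', pos, V, E)).1 := by
  induction arrows with
  | nil => intro a x y b a' pos V E h; exact h.1
  | cons d rest ih =>
    intro a x y b a' pos V E h
    have hd := hpre d (by simp)
    have h' := step_inv d a x y b a' pos V E hd.1 hd.2 h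
    have hpre' : ∀ a ∈ rest, 0 ≤ a ∧ a < 8 := fun a ha => hpre a (by simp [ha])
    simp only [List.foldl_cons]
    exact ih hpre' _ _ _ _ _ _ _ _ h'

-- ===== VERDICT (by name: the statement is the Claim_ definition above) =====
theorem solution_spec : Claim_equal_solution := by
  intro arrows _hdom hpre
  show solution arrows = solution_alt arrows
  unfold solution solution_alt
  exact fold_inv arrows hpre 0 0 0 PySem.Dict.empty 0 (0, 0) (PySem.Set.ofList [(0, 0)])
    PySem.Set.empty pvInv_init
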